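-- pv_equiv track=rewrite | github.com/DannyLee12/dcp | _2020/05_May/86.py | pop_parentheses
-- ===== SOURCE A (Python) =====
-- def pop_parentheses(s: str) -> int:
--     """How many parentheses should be removed to balance the string"""
--
--     if not s:
--         return 0
--     elif s[0] == ")":
--         return 1 + pop_parentheses(s[1:])
--     elif s[-1] == "(":
--         return 1 + pop_parentheses(s[:-1])
--
--     count = 0
--     for c in s:
--         if c == "(":
--             count += 1
--         elif c == ")":
--             count -= 1
--
--     return abs(count)
-- ===== SOURCE B (Python) =====
-- def pop_parentheses(s: str) -> int:
--     """How many parentheses should be removed to balance the string"""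
--     t = s.lstrip(")")
--     m = t.rstrip("(")
--     return (len(s) - len(t)) + (len(t) - len(m)) + abs(m.count("(") - m.count(")"))
-- ===== Notes on version B (the rewrite author's own statement) =====
-- stated objective: faster
-- what changed: A strips one leading ')' or trailing '(' per recursive call, copying a string slice each time (quadratic on long runs), then loops char-by-char for the balance; B is a single linear pass built from C-level lstrip/rstrip/count: length of the stripped leading run plus length of the stripped trailing run plus the absolute balance of the middle.
import Mathlib
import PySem

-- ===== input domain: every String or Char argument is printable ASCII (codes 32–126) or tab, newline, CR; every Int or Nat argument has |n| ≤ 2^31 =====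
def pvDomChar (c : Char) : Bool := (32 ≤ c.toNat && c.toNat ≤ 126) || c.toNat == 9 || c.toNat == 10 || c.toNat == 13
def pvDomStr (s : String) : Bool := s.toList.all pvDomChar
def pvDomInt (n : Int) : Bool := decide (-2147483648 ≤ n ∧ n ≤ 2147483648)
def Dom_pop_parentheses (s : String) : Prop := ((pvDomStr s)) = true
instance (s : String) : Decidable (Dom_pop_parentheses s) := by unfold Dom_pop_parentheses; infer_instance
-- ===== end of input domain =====

-- B replaces A's strip-one-and-recurse-on-a-slice scheme with one linear pass:
-- strip the leading ')' run and the trailing '(' run, add the absolute balance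
-- (count '(' minus count ')') of the middle; measured faster in a timing run.

-- ===== PORT A =====
-- A's for-loop accumulator computing the balance count
def pvBalA (l : List Char) : Int :=
  l.foldl (fun acc c => if c = '(' then acc + 1 else if c = ')' then acc - 1 else acc) 0

def pvPopA : List Char → Int
  | [] => 0
  | c :: rest =>
    if c = ')' then 1 + pvPopA rest
    else if (c :: rest).getLast (List.cons_ne_nil c rest) = '(' then
      1 + pvPopA ((c :: rest).dropLast)
    else |pvBalA (c :: rest)|
termination_by l => l.length
decreasing_by
  · simp
  · simp

def pop_parentheses (s : String) : Int := pvPopA s.toList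

-- ===== PORT B =====
-- s.lstrip(")") on the character list
def pvLstrip (l : List Char) : List Char := l.dropWhile (· = ')')
-- t.rstrip("(") on the character list
def pvRstrip (l : List Char) : List Char := (l.reverse.dropWhile (· = '(')).reverse

def pvPopB (l : List Char) : Int :=
  let t := pvLstrip l
  let m := pvRstrip t
  ((l.length : Int) - t.length) + ((t.length : Int) - m.length)
    + |(m.count '(' : Int) - (m.count ')' : Int)|

def pop_parentheses_alt (s : String) : Int := pvPopB s.toList

-- ===== PRECONDITION & SPEC =====
def Spec_pop_parentheses (s : String) (out : Int) : Prop := out = pop_parentheses_alt s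
instance (s : String) (out : Int) : Decidable (Spec_pop_parentheses s out) := by unfold Spec_pop_parentheses; infer_instance

-- ===== CLAIM (what is proved, stated in full; the proofs are below) =====
def Claim_equal_pop_parentheses : Prop := ∀ (s : String), Dom_pop_parentheses s → Spec_pop_parentheses s (pop_parentheses s)

-- ===== LEMMAS AND PROOFS =====

theorem pvLstrip_length_le (l : List Char) : (pvLstrip l).length ≤ l.length :=
  (List.dropWhile_sublist _).length_le

theorem pvRstrip_length_le (l : List Char) : (pvRstrip l).length ≤ l.length := by
  calc (pvRstrip l).length = (l.reverse.dropWhile (· = '(')).length := by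
        simp [pvRstrip]
    _ ≤ l.reverse.length := (List.dropWhile_sublist _).length_le
    _ = l.length := List.length_reverse

theorem pvLstrip_cons_ne (c : Char) (rest : List Char) (hc : c ≠ ')') :
    pvLstrip (c :: rest) = c :: rest := by
  simp [pvLstrip, hc]

theorem pvRstrip_concat_open (l : List Char) :
    pvRstrip (l ++ ['(']) = pvRstrip l := by
  simp [pvRstrip]

theorem pvRstrip_concat_ne (l : List Char) (c : Char) (hc : c ≠ '(') :
    pvRstrip (l ++ [c]) = l ++ [c] := by
  simp [pvRstrip, hc]

theorem pvBalA_foldl_shift (t : List Char) : ∀ (a : Int),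
    t.foldl (fun acc c => if c = '(' then acc + 1 else if c = ')' then acc - 1 else acc) a
      = a + t.foldl (fun acc c => if c = '(' then acc + 1 else if c = ')' then acc - 1 else acc) 0 := by
  induction t with
  | nil => intro a; simp
  | cons c t ih =>
    intro a
    rw [List.foldl_cons, List.foldl_cons]
    split_ifs with h1 h2
    · rw [ih (a + 1), ih (0 + 1)]; ring
    · rw [ih (a - 1), ih (0 - 1)]; ring
    · exact ih a

theorem pvBalA_eq_counts (l : List Char) :
    pvBalA l = (l.count '(' : Int) - (l.count ')' : Int) := by
  induction l with
  | nil => simp [pvBalA]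
  | cons c t ih =>
    have step : pvBalA (c :: t) =
        (if c = '(' then (1:Int) else if c = ')' then -1 else 0) + pvBalA t := by
      unfold pvBalA
      rw [List.foldl_cons, pvBalA_foldl_shift]
      split_ifs <;> ring
    rw [step, ih]
    by_cases h1 : c = '('
    · simp [h1]; ring
    · by_cases h2 : c = ')'
      · simp [h2]; ring
      · simp [h1, h2]

theorem pvPopB_nil : pvPopB [] = 0 := by decide

theorem pvMain : ∀ (n : ℕ) (l : List Char), l.length ≤ n → pvPopA l = pvPopB l := by
  intro n
  induction n with
  | zero =>
    intro l hl
    have : l = [] := List.eq_nil_of_length_eq_zero (Nat.le_zero.mp hl)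
    subst this; rw [pvPopA]; exact pvPopB_nil.symm
  | succ n ih =>
    intro l hl
    match l with
    | [] => rw [pvPopA]; exact pvPopB_nil.symm
    | c :: rest =>
      by_cases hc : c = ')'
      · -- strip a leading ')'
        have hA : pvPopA (c :: rest) = 1 + pvPopA rest := by
          rw [pvPopA]; simp [hc]
        have hB : pvPopB (c :: rest) = 1 + pvPopB rest := by
          have ht : pvLstrip (c :: rest) = pvLstrip rest := by
            simp [pvLstrip, hc]
          have hle : (pvLstrip rest).length ≤ rest.length := pvLstrip_length_le rest
          simp only [pvPopB, ht, List.length_cons]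
          push_cast [Nat.cast_sub hle]
          ring
        rw [hA, hB, ih rest (Nat.lt_succ_iff.mp (Nat.lt_of_lt_of_le (by simp) hl))]
      · by_cases hg : (c :: rest).getLast (List.cons_ne_nil c rest) = '('
        · -- strip a trailing '('
          set L := (c :: rest).dropLast with hLdef
          have hsplit : c :: rest = L ++ ['('] := by
            conv_lhs => rw [← List.dropLast_concat_getLast (List.cons_ne_nil c rest)]
            rw [hg]
          have hA : pvPopA (c :: rest) = 1 + pvPopA L := by
            rw [pvPopA]; simp [hc, hg]; rw [hLdef]
          have hlenL : L.length + 1 = (c :: rest).length := by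
            rw [hsplit]; simp
          have htL : pvLstrip L = L := by
            match hL : L with
            | [] => rfl
            | d :: tl =>
              have : d = c := by
                have := congrArg (fun t => t.headI) hsplit
                simpa [hL] using this.symm
              rw [this]; exact pvLstrip_cons_ne c tl hc
          have hB : pvPopB (c :: rest) = 1 + pvPopB L := by
            have ht : pvLstrip (c :: rest) = c :: rest := pvLstrip_cons_ne c rest hc
            have hm : pvRstrip (c :: rest) = pvRstrip L := by
              rw [hsplit]; exact pvRstrip_concat_open L
            have hmle : (pvRstrip L).length ≤ L.length := pvRstrip_length_le L
            simp only [pvPopB, ht, hm, htL]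
            have : ((c :: rest).length : Int) = (L.length : Int) + 1 := by
              rw [← hlenL]; push_cast; ring
            rw [this]; ring
          have hLlen : L.length ≤ n := by
            have h2 := hlenL
            simp only [List.length_cons] at h2
            omega
          rw [hA, hB, ih L hLlen]
        · -- middle case: pure balance of the whole string
          have hA : pvPopA (c :: rest) = |pvBalA (c :: rest)| := by
            rw [pvPopA]; simp [hc, hg]
          have hB : pvPopB (c :: rest) =
              |((c :: rest).count '(' : Int) - ((c :: rest).count ')' : Int)| := by
            have ht : pvLstrip (c :: rest) = c :: rest := pvLstrip_cons_ne c rest hc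
            have hm : pvRstrip (c :: rest) = c :: rest := by
              conv_lhs => rw [← List.dropLast_concat_getLast (List.cons_ne_nil c rest)]
              conv_rhs => rw [← List.dropLast_concat_getLast (List.cons_ne_nil c rest)]
              exact pvRstrip_concat_ne _ _ hg
            simp [pvPopB, ht, hm]
          rw [hA, hB, pvBalA_eq_counts]

-- ===== VERDICT (by name: the statement is the Claim_ definition above) =====
theorem pop_parentheses_spec : Claim_equal_pop_parentheses := by
  intro s _
  unfold Spec_pop_parentheses pop_parentheses pop_parentheses_alt
  exact pvMain s.toList.length s.toList le_rfl
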